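-- pv_equiv track=rewrite | github.com/sorodocosmin/python | Lab_2/lab_2.py | ex_4
-- ===== SOURCE A (Python) =====
-- def ex_4(list_musical_notes: list, list_steps: list, pos_start: int) -> list | None:
--     """
--     The function will return the song composed by going through the musical notes
--     beginning with the start position and following the moves given as parameter.
--     compose(["do", "re", "mi", "fa", "sol"], [1, -3, 4, 2], 2)
--     -->["mi", "fa", "do", "sol", "re"]
--     :param list_musical_notes: list(string)
--     :param list_steps: list(int)
--     :param pos_start: int
--     :return:
--     """
--
--     len_mus_notes = len(list_musical_notes)
--
--     if pos_start >= len_mus_notes:  # l[len(l)] --> IndexErr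
--         return None
--     elif abs(pos_start) > len_mus_notes:  # l[-len(l)-1] --> IndexErr
--         return None
--
--     # we'll no longer check if the list_mus_notes are actually strings and valid notes
--     song_composed = [list_musical_notes[pos_start]]
--     curr_step = pos_start
--     for step in list_steps:
--         curr_step += step
--         curr_step %= len_mus_notes
--         song_composed += [list_musical_notes[curr_step]]
--
--     return song_composed
-- ===== SOURCE B (Python) =====
-- def ex_4(list_musical_notes: list, list_steps: list, pos_start: int) -> list | None:
--     """Compose the song by maintaining a rotated copy of the note list: the
--     current note always sits at index 0, and each step rotates the list, so the
--     song is read off the front instead of being indexed by a running modular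
--     position."""
--     n = len(list_musical_notes)
--     if pos_start >= n or abs(pos_start) > n:
--         return None
--     k = pos_start % n
--     rot = list_musical_notes[k:] + list_musical_notes[:k]
--     song = [rot[0]]
--     for step in list_steps:
--         k = step % n
--         rot = rot[k:] + rot[:k]
--         song.append(rot[0])
--     return song
-- ===== Notes on version B (the rewrite author's own statement) =====
-- stated objective: alternative
-- what changed: B never tracks a running modular position or indexes the note list: it maintains a rotated copy of the note list so the current note is always at index 0, rotating the copy by step % n for each step and reading the front, instead of A's running-index loop with modular indexing.
import Mathlib
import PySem

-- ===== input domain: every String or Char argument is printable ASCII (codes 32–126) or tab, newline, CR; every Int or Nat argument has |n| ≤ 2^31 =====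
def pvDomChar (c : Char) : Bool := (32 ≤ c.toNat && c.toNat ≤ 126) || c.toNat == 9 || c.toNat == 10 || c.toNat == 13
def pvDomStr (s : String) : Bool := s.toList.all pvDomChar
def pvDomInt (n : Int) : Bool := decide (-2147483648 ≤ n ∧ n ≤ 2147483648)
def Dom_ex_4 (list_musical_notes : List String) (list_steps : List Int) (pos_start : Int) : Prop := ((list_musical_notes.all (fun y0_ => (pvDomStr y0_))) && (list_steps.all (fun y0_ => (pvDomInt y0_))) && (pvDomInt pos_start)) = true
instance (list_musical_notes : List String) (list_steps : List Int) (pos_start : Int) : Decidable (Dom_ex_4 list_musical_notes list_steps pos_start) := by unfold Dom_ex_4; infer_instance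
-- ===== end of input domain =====

-- B maintains a rotated copy of the note list (current note always at index 0, each step
-- rotates the copy and reads the front) instead of A's running modular index into the fixed
-- list; equal return value everywhere (alternative decomposition, not faster).


-- ===== PORT A =====
-- literal port of A: guards, then one fold carrying (curr_step, song), modding at every step
def ex_4 (list_musical_notes : List String) (list_steps : List Int) (pos_start : Int) : Option (List String) :=
  let len_mus_notes : Int := list_musical_notes.length
  if pos_start ≥ len_mus_notes then none
  else if |pos_start| > len_mus_notes then none
  else
    -- indices are always in range here, so the default of pyGetD is never used
    let song0 := [PySem.List.pyGetD list_musical_notes pos_start ""]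
    let res := list_steps.foldl
      (fun (st : Int × List String) step =>
        let c := PySem.Int.mod (st.1 + step) len_mus_notes
        (c, st.2 ++ [PySem.List.pyGetD list_musical_notes c ""]))
      (pos_start, song0)
    some res.2

-- ===== PORT B =====
-- literal port of B: same guards; keep a rotated copy of the notes (current note at index 0),
-- rotate by step % n for each step and read the front.  A Python slice l[k:]+l[:k] with
-- 0 ≤ k ≤ len(l) is exactly List.drop k ++ List.take k; k = x % n lies in [0, n) so .toNat is exact.
def ex_4_alt (list_musical_notes : List String) (list_steps : List Int) (pos_start : Int) : Option (List String) :=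
  let n : Int := list_musical_notes.length
  if pos_start ≥ n ∨ |pos_start| > n then none
  else
    let k0 := (PySem.Int.mod pos_start n).toNat
    let rot0 := list_musical_notes.drop k0 ++ list_musical_notes.take k0
    let res := list_steps.foldl
      (fun (st : List String × List String) step =>
        let k := (PySem.Int.mod step n).toNat
        let rot := st.1.drop k ++ st.1.take k
        (rot, st.2 ++ [PySem.List.pyGetD rot 0 ""]))
      (rot0, [PySem.List.pyGetD rot0 0 ""])
    some res.2

-- ===== PRECONDITION & SPEC =====
def Spec_ex_4 (list_musical_notes : List String) (list_steps : List Int) (pos_start : Int) (out : Option (List String)) : Prop := out = ex_4_alt list_musical_notes list_steps pos_start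
instance (list_musical_notes : List String) (list_steps : List Int) (pos_start : Int) (out : Option (List String)) : Decidable (Spec_ex_4 list_musical_notes list_steps pos_start out) := by unfold Spec_ex_4; infer_instance

-- ===== CLAIM (what is proved, stated in full; the proofs are below) =====
def Claim_equal_ex_4 : Prop := ∀ (list_musical_notes : List String) (list_steps : List Int) (pos_start : Int), Dom_ex_4 list_musical_notes list_steps pos_start → Spec_ex_4 list_musical_notes list_steps pos_start (ex_4 list_musical_notes list_steps pos_start)

-- ===== LEMMAS AND PROOFS =====

-- the common "trace" of notes produced after the seed, parameterised by the raw running total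
def pvWalk (lmn : List String) (n : Int) : Int → List Int → List String
  | _, [] => []
  | t, s :: ss =>
      PySem.List.pyGetD lmn (PySem.Int.mod (t + s) n) "" :: pvWalk lmn n (t + s) ss

theorem pvWalk_mod_congr (lmn : List String) (n : Int) (hn : 0 < n) :
    ∀ (steps : List Int) (c t : Int), PySem.Int.mod c n = PySem.Int.mod t n →
      pvWalk lmn n c steps = pvWalk lmn n t steps := by
  intro steps
  induction steps with
  | nil => intro c t _; rfl
  | cons s ss ih =>
      intro c t h
      have hmod : PySem.Int.mod (c + s) n = PySem.Int.mod (t + s) n := by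
        simp only [PySem.Int.mod_eq_emod_of_pos hn] at h ⊢
        rw [Int.add_emod c, Int.add_emod t, h]
      simp only [pvWalk, hmod]
      exact congrArg _ (ih (c + s) (t + s) hmod)

-- A's fold appends exactly the walk that re-mods the running (already modded) position
theorem foldA_eq (lmn : List String) (n : Int) (hn : 0 < n) :
    ∀ (steps : List Int) (c : Int) (song : List String),
      (steps.foldl
        (fun (st : Int × List String) step =>
          let c' := PySem.Int.mod (st.1 + step) n
          (c', st.2 ++ [PySem.List.pyGetD lmn c' ""])) (c, song)).2
      = song ++ pvWalk lmn n c steps := by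
  intro steps
  induction steps with
  | nil => intro c song; simp [pvWalk]
  | cons s ss ih =>
      intro c song
      simp only [List.foldl_cons, pvWalk]
      rw [ih]
      have hcongr : pvWalk lmn n (PySem.Int.mod (c + s) n) ss = pvWalk lmn n (c + s) ss := by
        apply pvWalk_mod_congr lmn n hn
        simp only [PySem.Int.mod_eq_emod_of_pos hn]
        rw [Int.emod_emod_of_dvd _ dvd_rfl]
      rw [hcongr]
      simp

-- the front of a rotation of lmn by m is the walk note at any t with m ≡ t (mod n)
theorem front_rotate_eq (lmn : List String) (hn : 0 < lmn.length) (m : Nat) (t : Int)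
    (hm : (m : Int) % (lmn.length : Int) = PySem.Int.mod t (lmn.length : Int)) :
    PySem.List.pyGetD (lmn.rotate m) 0 "" = PySem.List.pyGetD lmn (PySem.Int.mod t (lmn.length : Int)) "" := by
  have hnI : (0 : Int) < (lmn.length : Int) := by exact_mod_cast hn
  have hmod : PySem.Int.mod t (lmn.length : Int) = t % (lmn.length : Int) :=
    PySem.Int.mod_eq_emod_of_pos hnI
  have h0 : (0 : Int) ≤ t % (lmn.length : Int) := Int.emod_nonneg _ (by omega)
  have h1 : t % (lmn.length : Int) < (lmn.length : Int) := Int.emod_lt_of_pos _ hnI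
  have hlen : 0 < (lmn.rotate m).length := by rw [List.length_rotate]; exact hn
  rw [PySem.List.pyGetD_eq_getElem _ _ (by omega) (by simpa [List.length_rotate] using hlen),
      hmod, PySem.List.pyGetD_eq_getElem _ _ h0 (by simpa using h1)]
  rw [List.getElem_rotate]
  congr 1
  have : ((m : Int)) % (lmn.length : Int) = t % (lmn.length : Int) := by rw [hm, hmod]
  have hmlt : m % lmn.length = (t % (lmn.length : Int)).toNat := by
    have hc : ((m % lmn.length : Nat) : Int) = t % (lmn.length : Int) := by
      push_cast
      exact this
    omega
  simpa using hmlt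

-- B's rotation fold produces the same walk: invariant rot = lmn.rotate m with m ≡ t (mod n)
theorem foldB_eq (lmn : List String) (hn : 0 < lmn.length) :
    ∀ (steps : List Int) (m : Nat) (t : Int) (song : List String),
      (m : Int) % (lmn.length : Int) = PySem.Int.mod t (lmn.length : Int) →
      (steps.foldl
        (fun (st : List String × List String) step =>
          let k := (PySem.Int.mod step (lmn.length : Int)).toNat
          let rot := st.1.drop k ++ st.1.take k
          (rot, st.2 ++ [PySem.List.pyGetD rot 0 ""]))
        (lmn.rotate m, song)).2
      = song ++ pvWalk lmn (lmn.length : Int) t steps := by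
  intro steps
  induction steps with
  | nil => intro m t song _; simp [pvWalk]
  | cons s ss ih =>
      intro m t song hm
      have hnI : (0 : Int) < (lmn.length : Int) := by exact_mod_cast hn
      have hmodpos : (0 : Int) ≤ s % (lmn.length : Int) := Int.emod_nonneg _ (by omega)
      have hmodlt : s % (lmn.length : Int) < (lmn.length : Int) := Int.emod_lt_of_pos _ hnI
      set k : Nat := (PySem.Int.mod s (lmn.length : Int)).toNat with hk
      have hkI : (k : Int) = s % (lmn.length : Int) := by
        rw [hk, PySem.Int.mod_eq_emod_of_pos hnI]; omega
      have hkle : k ≤ (lmn.rotate m).length := by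
        rw [List.length_rotate]; omega
      have hrot : (lmn.rotate m).drop k ++ (lmn.rotate m).take k = lmn.rotate (m + k) := by
        rw [← List.rotate_eq_drop_append_take hkle, List.rotate_rotate]
      have hm' : ((m + k : Nat) : Int) % (lmn.length : Int)
          = PySem.Int.mod (t + s) (lmn.length : Int) := by
        rw [PySem.Int.mod_eq_emod_of_pos hnI] at hm ⊢
        push_cast
        rw [Int.add_emod ((m : Int)), hm, hkI, Int.emod_emod_of_dvd _ dvd_rfl,
            ← Int.add_emod]
      simp only [List.foldl_cons, pvWalk]
      rw [hrot] at *
      rw [ih (m + k) (t + s) _ hm']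
      rw [front_rotate_eq lmn hn (m + k) (t + s) hm']
      simp

-- the seed note: A indexes at pos_start directly (possibly negative), B at pos_start % n
theorem seed_eq (lmn : List String) (p : Int) (hlo : -(lmn.length : Int) ≤ p)
    (hhi : p < (lmn.length : Int)) (hn : 0 < (lmn.length : Int)) :
    PySem.List.pyGetD lmn p ""
      = PySem.List.pyGetD lmn (PySem.Int.mod p (lmn.length : Int)) "" := by
  rw [PySem.Int.mod_eq_emod_of_pos hn]
  rcases le_or_gt 0 p with hp | hp
  · rw [Int.emod_eq_of_lt hp hhi]
  · have hmod : p % (lmn.length : Int) = p + lmn.length := by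
      have h1 : (p + (lmn.length : Int)) % (lmn.length : Int) = p % (lmn.length : Int) := by
        simp
      rw [← h1]
      exact Int.emod_eq_of_lt (by omega) (by omega)
    rw [hmod]
    have hk : 0 < (-p).toNat ∧ (-p).toNat ≤ lmn.length := by omega
    have hpe : p = -(((-p).toNat : Nat) : Int) := by omega
    rw [hpe, PySem.List.pyGetD_neg_natCast _ _ _ hk.1 hk.2]
    rw [PySem.List.pyGetD_eq_getElem _ _ (by omega) (by omega)]
    congr 1
    omega

-- ===== VERDICT (by name: the statement is the Claim_ definition above) =====
theorem ex_4_spec : Claim_equal_ex_4 := by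
  intro lmn steps p _
  unfold Spec_ex_4 ex_4 ex_4_alt
  by_cases h1 : p ≥ (lmn.length : Int)
  · simp [h1]
  · by_cases h2 : |p| > (lmn.length : Int)
    · simp [h1, h2]
    · have hn : 0 < lmn.length := by
        rcases le_or_gt 0 p with hp | hp
        · have : 0 ≤ p := hp; omega
        · have habs := abs_of_neg hp; omega
      have hnI : (0 : Int) < (lmn.length : Int) := by exact_mod_cast hn
      simp only [h1, h2, if_false, or_self]
      set k0 : Nat := (PySem.Int.mod p (lmn.length : Int)).toNat with hk0
      have hmodnn : (0 : Int) ≤ p % (lmn.length : Int) :=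
        Int.emod_nonneg p (by omega)
      have hmodlt : p % (lmn.length : Int) < (lmn.length : Int) := Int.emod_lt_of_pos p hnI
      have hkval : (k0 : Int) = p % (lmn.length : Int) := by
        rw [hk0, PySem.Int.mod_eq_emod_of_pos hnI]; omega
      have hk0le : k0 ≤ lmn.length := by omega
      have hrot0 : lmn.drop k0 ++ lmn.take k0 = lmn.rotate k0 :=
        (List.rotate_eq_drop_append_take hk0le).symm
      have hm0 : (k0 : Int) % (lmn.length : Int) = PySem.Int.mod p (lmn.length : Int) := by
        rw [hkval, PySem.Int.mod_eq_emod_of_pos hnI]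
        exact Int.emod_emod_of_dvd _ dvd_rfl
      rw [foldA_eq lmn (lmn.length : Int) hnI, hrot0, foldB_eq lmn hn steps k0 p _ hm0]
      rw [front_rotate_eq lmn hn k0 p hm0]
      rw [seed_eq lmn p (by have := neg_abs_le p; omega) (by omega) hnI]
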